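-- pv_equiv track=rewrite | github.com/YurkinGB/Urban | module2hard.py | password_selection
-- ===== SOURCE A (Python) =====
-- def password_selection(num):
--     result = []
--     number_list = list(range(num))
--
--     for i in number_list[1: len(number_list) // 2 + 1]:
--         for j in number_list[i + 1:]:
--             if num % (i + j) == 0:
--                 result.append(str(i) + str(j))
--     return result
-- ===== SOURCE B (Python) =====
-- def password_selection(num):
--     # precompute the divisors of num once; for each i, each divisor d >= 2*i+1
--     # corresponds to exactly one j = d - i of the original inner scan
--     divs = [d for d in range(3, num + 1) if num % d == 0]
--     result = []
--     for i in range(1, num // 2 + 1):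
--         for d in divs:
--             if 2 * i + 1 <= d:
--                 result.append(str(i) + str(d - i))
--     return result
-- ===== Notes on version B (the rewrite author's own statement) =====
-- stated objective: faster
-- what changed: Instead of testing divisibility of num for every index pair via a nested scan, B precomputes the divisors of num once and, for each outer index i, walks only the divisors large enough to yield a valid partner j = d - i.
import Mathlib
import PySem

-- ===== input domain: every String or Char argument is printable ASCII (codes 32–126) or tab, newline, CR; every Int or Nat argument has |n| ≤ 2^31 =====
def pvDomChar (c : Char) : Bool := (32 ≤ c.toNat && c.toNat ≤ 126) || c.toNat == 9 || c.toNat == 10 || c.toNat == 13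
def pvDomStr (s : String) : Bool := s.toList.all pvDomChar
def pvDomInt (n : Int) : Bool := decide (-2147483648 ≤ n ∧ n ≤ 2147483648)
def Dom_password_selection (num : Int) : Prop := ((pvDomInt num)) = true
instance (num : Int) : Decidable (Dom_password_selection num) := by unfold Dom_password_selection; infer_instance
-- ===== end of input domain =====

-- B replaces A's quadratic pair scan by precomputing the divisors of num once and, per i, walking
-- only divisors d ≥ 2*i+1 (j = d - i); measured faster, same return value proved for every num.


-- ===== PORT A =====
def password_selection (num : Int) : List String :=
  let number_list := PySem.List.pyRange 0 num 1
  (PySem.List.slice number_list (some 1)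
      (some (PySem.Int.floordiv ((number_list.length : Int)) 2 + 1))).foldl
    (fun result i =>
      (PySem.List.slice number_list (some (i + 1)) none).foldl
        (fun result j =>
          if PySem.Int.mod num (i + j) == 0 then
            result ++ [PySem.Int.toStr i ++ PySem.Int.toStr j]
          else result)
        result)
    []

-- ===== PORT B =====
def password_selection_alt (num : Int) : List String :=
  let divs := (PySem.List.pyRange 3 (num + 1) 1).filter (fun d => PySem.Int.mod num d == 0)
  (PySem.List.pyRange 1 (PySem.Int.floordiv num 2 + 1) 1).foldl
    (fun result i =>
      divs.foldl
        (fun result d =>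
          if decide (2 * i + 1 ≤ d) then
            result ++ [PySem.Int.toStr i ++ PySem.Int.toStr (d - i)]
          else result)
        result)
    []

-- ===== PRECONDITION & SPEC =====
def Spec_password_selection (num : Int) (out : List String) : Prop := out = password_selection_alt num
instance (num : Int) (out : List String) : Decidable (Spec_password_selection num out) := by unfold Spec_password_selection; infer_instance

-- ===== CLAIM (what is proved, stated in full; the proofs are below) =====
def Claim_equal_password_selection : Prop := ∀ (num : Int), Dom_password_selection num → Spec_password_selection num (password_selection num)

-- ===== LEMMAS AND PROOFS =====

-- shifting an integer range by -i
lemma pyRange_map_sub (a b i : Int) :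
    (PySem.List.pyRange a b 1).map (fun d => d - i) = PySem.List.pyRange (a - i) (b - i) 1 := by
  have h : b - i - (a - i) = b - a := by ring
  simp only [PySem.List.pyRange_one, List.map_map, h]
  apply List.map_congr_left
  intro k _
  simp only [Function.comp]
  ring

-- a slice [a:b] of range(0, n)
lemma slice_pyRange (n a b : Int) (h0 : 0 ≤ a) (hab : a ≤ b) (hb : b ≤ n) :
    PySem.List.slice (PySem.List.pyRange 0 n 1) (some a) (some b) = PySem.List.pyRange a b 1 := by
  have ha' : a = ((a.toNat : Nat) : Int) := by omega
  have hb' : b = ((b.toNat : Nat) : Int) := by omega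
  rw [ha', hb', PySem.List.slice_natCast]
  apply List.ext_getElem
  · simp [PySem.List.length_pyRange_one]
    omega
  · intro j h1 h2
    simp only [List.getElem_take, List.getElem_drop, PySem.List.getElem_pyRange_one]
    push_cast
    omega

-- a tail slice [a:] of range(0, n)
lemma slice_from_pyRange (n a : Int) (h0 : 0 ≤ a) :
    PySem.List.slice (PySem.List.pyRange 0 n 1) (some a) none = PySem.List.pyRange a n 1 := by
  have ha' : a = ((a.toNat : Nat) : Int) := by omega
  rw [ha', PySem.List.slice_from_natCast]
  apply List.ext_getElem
  · simp [PySem.List.length_pyRange_one]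
    omega
  · intro j h1 h2
    simp only [List.getElem_drop, PySem.List.getElem_pyRange_one]
    push_cast
    omega

-- for each admitted i, A's inner scan over j and B's walk over divisors give the same strings:
-- j ↦ i + j is an order-preserving bijection between A's accepted j's and B's in-range divisors
lemma inner_eq (num i : Int) (h1 : 1 ≤ i) (h2 : 2 * i ≤ num) :
    ((PySem.List.pyRange (i + 1) num 1).filter (fun j => PySem.Int.mod num (i + j) == 0)).map
        (fun j => PySem.Int.toStr i ++ PySem.Int.toStr j)
      = (((PySem.List.pyRange 3 (num + 1) 1).filter (fun d => PySem.Int.mod num d == 0)).filter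
          (fun d => decide (2 * i + 1 ≤ d))).map
        (fun d => PySem.Int.toStr i ++ PySem.Int.toStr (d - i)) := by
  have hshift : PySem.List.pyRange (i + 1) num 1
      = (PySem.List.pyRange (2 * i + 1) (num + i) 1).map (fun d => d - i) := by
    rw [pyRange_map_sub]
    congr 1 <;> ring
  rw [hshift, List.filter_map, List.map_map, List.filter_filter]
  simp only [Function.comp_def]
  -- reduce both sides to a filter over the common range [2*i+1, num+1)
  have hsplitL : PySem.List.pyRange (2 * i + 1) (num + i) 1
      = PySem.List.pyRange (2 * i + 1) (num + 1) 1 ++ PySem.List.pyRange (num + 1) (num + i) 1 :=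
    PySem.List.pyRange_one_append _ _ _ (by omega) (by omega)
  have hsplitR : PySem.List.pyRange 3 (num + 1) 1
      = PySem.List.pyRange 3 (2 * i + 1) 1 ++ PySem.List.pyRange (2 * i + 1) (num + 1) 1 :=
    PySem.List.pyRange_one_append _ _ _ (by omega) (by omega)
  rw [hsplitL, hsplitR, List.filter_append, List.filter_append]
  have hnilL : (PySem.List.pyRange (num + 1) (num + i) 1).filter
      (fun j => PySem.Int.mod num (i + (j - i)) == 0) = [] := by
    rw [List.filter_eq_nil_iff]
    intro d hd
    rw [PySem.List.mem_pyRange_one] at hd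
    have hdpos : 0 < d := by omega
    have : PySem.Int.mod num d = num := by
      rw [PySem.Int.mod_eq_emod_of_pos hdpos]
      exact Int.emod_eq_of_lt (by omega) (by omega)
    have hsim : i + (d - i) = d := by ring
    simp [hsim, this]
    omega
  have hnilR : (PySem.List.pyRange 3 (2 * i + 1) 1).filter
      (fun d => decide (2 * i + 1 ≤ d) && (PySem.Int.mod num d == 0)) = [] := by
    rw [List.filter_eq_nil_iff]
    intro d hd
    rw [PySem.List.mem_pyRange_one] at hd
    simp
    omega
  rw [hnilL, hnilR, List.append_nil, List.nil_append]
  have hsame : (PySem.List.pyRange (2 * i + 1) (num + 1) 1).filter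
        (fun j => PySem.Int.mod num (i + (j - i)) == 0)
      = (PySem.List.pyRange (2 * i + 1) (num + 1) 1).filter
        (fun d => decide (2 * i + 1 ≤ d) && (PySem.Int.mod num d == 0)) := by
    apply List.filter_congr
    intro d hd
    rw [PySem.List.mem_pyRange_one] at hd
    have hsim : i + (d - i) = d := by ring
    simp [hsim, hd.1]
  rw [hsame]

lemma password_selection_eq (num : Int) : password_selection num = password_selection_alt num := by
  simp only [password_selection, password_selection_alt]
  by_cases hn : num ≤ 0
  · have h0 : PySem.List.pyRange 0 num 1 = [] := PySem.List.pyRange_one_eq_nil hn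
    have h1 : PySem.Int.floordiv num 2 + 1 ≤ 1 := by
      have := (PySem.Int.le_floordiv_iff_mul_le (a := num) (b := 2) (q := 1) (by omega))
      omega
    have h2 : PySem.List.pyRange 1 (PySem.Int.floordiv num 2 + 1) 1 = [] :=
      PySem.List.pyRange_one_eq_nil h1
    rw [h0, h2]
    simp [PySem.List.slice]
  · push Not at hn
    have hlen : ((PySem.List.pyRange 0 num 1).length : Int) = num := by
      rw [PySem.List.length_pyRange_one]; omega
    have hfd0 : 0 ≤ PySem.Int.floordiv num 2 :=
      (PySem.Int.le_floordiv_iff_mul_le (by omega)).mpr (by omega)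
    have hfdlt : PySem.Int.floordiv num 2 < num :=
      (PySem.Int.floordiv_lt_iff_lt_mul (by omega)).mpr (by omega)
    rw [hlen]
    rw [slice_pyRange num 1 (PySem.Int.floordiv num 2 + 1) (by omega) (by omega) (by omega)]
    apply PySem.List.foldl_congr_mem
    intro acc i hi
    rw [PySem.List.mem_pyRange_one] at hi
    have h2i : 2 * i ≤ num := by
      have := (PySem.Int.le_floordiv_iff_mul_le (a := num) (b := 2) (q := i) (by omega)).mp (by omega)
      omega
    rw [slice_from_pyRange num (i + 1) (by omega)]
    rw [PySem.List.foldl_append_if (fun j => PySem.Int.mod num (i + j) == 0)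
          (fun j => PySem.Int.toStr i ++ PySem.Int.toStr j),
        PySem.List.foldl_append_if (fun d => decide (2 * i + 1 ≤ d))
          (fun d => PySem.Int.toStr i ++ PySem.Int.toStr (d - i))]
    rw [inner_eq num i (by omega) h2i, List.filter_filter]

-- ===== VERDICT (by name: the statement is the Claim_ definition above) =====
theorem password_selection_spec : Claim_equal_password_selection := by
  intro num _
  unfold Spec_password_selection
  exact password_selection_eq num
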